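-- pv_equiv track=rewrite | github.com/Soude640/Benchmarking | workload_scripts/workload.py | make_node_workers
-- ===== SOURCE A (Python) =====
-- service_worker_node_1 = 'test_masterspark-worker'
--
-- service_worker_node_2 = 'test_spark-worker'
--
-- def make_node_workers(servers_count: int) -> dict:
--     if servers_count == 2:
--         node_workers = dict()
--         node_1 = 1
--         node_2 = 0
--         for i in range(1, 400):
--             node_workers[str(i)] = {
--                 service_worker_node_1: node_1,
--                 service_worker_node_2: node_2
--             }
--             if i % 2 == 0:
--                 node_1 += 1
--             else:
--                 node_2 += 1
--     else:
--         node_workers = dict()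
--         for i in range(1, 200):
--             node_workers[str(i)] = {
--                 service_worker_node_1: i,
--                 service_worker_node_2: 0
--             }
--     return node_workers
-- ===== SOURCE B (Python) =====
-- service_worker_node_1 = 'test_masterspark-worker'
--
-- service_worker_node_2 = 'test_spark-worker'
--
-- def make_node_workers(servers_count: int) -> dict:
--     # Staged: first compute the (index, n1, n2) rows with closed-form counts
--     # (no running accumulators, no parity branch), then one shared dict build.
--     if servers_count == 2:
--         rows = [(i, 1 + (i - 1) // 2, i // 2) for i in range(1, 400)]
--     else:
--         rows = [(i, i, 0) for i in range(1, 200)]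
--     return {
--         str(i): {service_worker_node_1: a, service_worker_node_2: b}
--         for i, a, b in rows
--     }
-- ===== Notes on version B (the rewrite author's own statement) =====
-- stated objective: simpler
-- what changed: Replaces A's single stateful loop (two running-sum accumulators updated under an i%2 branch, dict written as it goes) by a staged decomposition: a rows list of (index, n1, n2) triples computed with the closed forms 1+(i-1)//2 and i//2, then one shared branch-free dict comprehension over the rows.
import Mathlib
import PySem

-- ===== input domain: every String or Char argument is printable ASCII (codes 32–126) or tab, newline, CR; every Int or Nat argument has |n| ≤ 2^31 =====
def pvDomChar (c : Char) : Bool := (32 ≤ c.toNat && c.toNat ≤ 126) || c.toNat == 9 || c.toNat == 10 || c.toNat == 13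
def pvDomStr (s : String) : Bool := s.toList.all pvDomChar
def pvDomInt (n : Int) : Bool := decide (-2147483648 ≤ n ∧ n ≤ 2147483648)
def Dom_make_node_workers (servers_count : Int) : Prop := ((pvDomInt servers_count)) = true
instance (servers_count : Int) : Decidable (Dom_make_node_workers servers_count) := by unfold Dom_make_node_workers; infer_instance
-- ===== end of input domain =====

-- B stages the computation: a rows list of (index, n1, n2) triples with the
-- closed forms 1+(i-1)//2 and i//2 (no accumulators, no parity branch), then
-- one shared dict build over the rows (objective: simpler).

-- ===== PORT A =====
def service_worker_node_1 : String := "test_masterspark-worker"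
def service_worker_node_2 : String := "test_spark-worker"

def make_node_workers (servers_count : Int) : List (String × List (String × Int)) :=
  if servers_count = 2 then
    -- dict + two accumulators threaded through the loop, entry written before the parity update
    ((PySem.List.pyRange 1 400 1).foldl
      (fun (st : PySem.Dict String (List (String × Int)) × Int × Int) i =>
        let d := st.1.insert (PySem.Int.toStr i)
          [(service_worker_node_1, st.2.1), (service_worker_node_2, st.2.2)]
        if PySem.Int.mod i 2 = 0 then (d, st.2.1 + 1, st.2.2) else (d, st.2.1, st.2.2 + 1))
      (PySem.Dict.empty, 1, 0)).1.items
  else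
    ((PySem.List.pyRange 1 200 1).foldl
      (fun (d : PySem.Dict String (List (String × Int))) i =>
        d.insert (PySem.Int.toStr i) [(service_worker_node_1, i), (service_worker_node_2, 0)])
      PySem.Dict.empty).items

-- ===== PORT B =====
-- stage 2 of B: the shared branch-free dict comprehension over the rows
def rowsToDict (rows : List (Int × Int × Int)) : List (String × List (String × Int)) :=
  (rows.foldl
    (fun (d : PySem.Dict String (List (String × Int))) r =>
      d.insert (PySem.Int.toStr r.1)
        [(service_worker_node_1, r.2.1), (service_worker_node_2, r.2.2)])
    PySem.Dict.empty).items

def make_node_workers_alt (servers_count : Int) : List (String × List (String × Int)) :=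
  -- stage 1: the rows list (index, n1, n2), closed forms, no state
  rowsToDict
    (if servers_count = 2 then
      (PySem.List.pyRange 1 400 1).map
        (fun i => (i, 1 + PySem.Int.floordiv (i - 1) 2, PySem.Int.floordiv i 2))
    else
      (PySem.List.pyRange 1 200 1).map (fun i => (i, i, 0)))

-- ===== PRECONDITION & SPEC =====
def Spec_make_node_workers (servers_count : Int) (out : List (String × List (String × Int))) : Prop := out = make_node_workers_alt servers_count
instance (servers_count : Int) (out : List (String × List (String × Int))) : Decidable (Spec_make_node_workers servers_count out) := by unfold Spec_make_node_workers; infer_instance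

-- ===== CLAIM (what is proved, stated in full; the proofs are below) =====
def Claim_equal_make_node_workers : Prop := ∀ (servers_count : Int), Dom_make_node_workers servers_count → Spec_make_node_workers servers_count (make_node_workers servers_count)

-- ===== LEMMAS AND PROOFS =====

-- A's loop with accumulators (n1, n2) = (1 + (a-1)//2, a//2) agrees, on the tail
-- range starting at a, with the closed-form insertion loop from the same dict.
theorem loop2_invariant : ∀ (n : Nat) (a : Int), a + n = 400 → 1 ≤ a →
    ∀ (d : PySem.Dict String (List (String × Int))),
    ((PySem.List.pyRange a 400 1).foldl
      (fun (st : PySem.Dict String (List (String × Int)) × Int × Int) i =>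
        let d := st.1.insert (PySem.Int.toStr i)
          [(service_worker_node_1, st.2.1), (service_worker_node_2, st.2.2)]
        if PySem.Int.mod i 2 = 0 then (d, st.2.1 + 1, st.2.2) else (d, st.2.1, st.2.2 + 1))
      (d, 1 + PySem.Int.floordiv (a - 1) 2, PySem.Int.floordiv a 2)).1
    = (PySem.List.pyRange a 400 1).foldl
      (fun (d : PySem.Dict String (List (String × Int))) i =>
        d.insert (PySem.Int.toStr i)
          [(service_worker_node_1, 1 + PySem.Int.floordiv (i - 1) 2),
           (service_worker_node_2, PySem.Int.floordiv i 2)])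
      d := by
  intro n
  induction n with
  | zero =>
      intro a ha _ d
      rw [PySem.List.pyRange_one_eq_nil (by omega)]
      rfl
  | succ m ih =>
      intro a ha h1 d
      rw [PySem.List.pyRange_one_cons (by omega)]
      simp only [List.foldl_cons]
      by_cases hpar : PySem.Int.mod a 2 = 0
      · rw [if_pos hpar]
        have hdiv : 1 + PySem.Int.floordiv (a - 1) 2 + 1 = 1 + PySem.Int.floordiv ((a + 1) - 1) 2
            ∧ PySem.Int.floordiv a 2 = PySem.Int.floordiv (a + 1) 2 := by
          rw [PySem.Int.mod_eq_emod_of_pos (a := a) (b := 2) (by omega)] at hpar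
          simp only [PySem.Int.floordiv_eq_ediv_of_pos (b := 2) (by omega)]
          omega
        rw [hdiv.1, hdiv.2]
        exact ih (a + 1) (by omega) (by omega) _
      · rw [if_neg hpar]
        have hdiv : 1 + PySem.Int.floordiv (a - 1) 2 = 1 + PySem.Int.floordiv ((a + 1) - 1) 2
            ∧ PySem.Int.floordiv a 2 + 1 = PySem.Int.floordiv (a + 1) 2 := by
          rw [PySem.Int.mod_eq_emod_of_pos (a := a) (b := 2) (by omega)] at hpar
          simp only [PySem.Int.floordiv_eq_ediv_of_pos (b := 2) (by omega)]
          omega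
        rw [hdiv.1, hdiv.2]
        exact ih (a + 1) (by omega) (by omega) _

-- ===== VERDICT (by name: the statement is the Claim_ definition above) =====
set_option maxRecDepth 8000 in
theorem make_node_workers_spec : Claim_equal_make_node_workers := by
  intro servers_count _
  unfold Spec_make_node_workers make_node_workers make_node_workers_alt
  by_cases h : servers_count = 2
  · conv_lhs => rw [if_pos h]
    conv_rhs => rw [if_pos h]
    unfold rowsToDict
    have hinv := loop2_invariant 399 1 (by norm_num) (by norm_num) PySem.Dict.empty
    have e1 : (1 : Int) + PySem.Int.floordiv (1 - 1) 2 = 1 := by decide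
    have e2 : PySem.Int.floordiv (1 : Int) 2 = 0 := by decide
    rw [e1, e2] at hinv
    conv_lhs => rw [hinv]
    generalize PySem.List.pyRange 1 400 1 = l
    rw [List.foldl_map]
  · conv_lhs => rw [if_neg h]
    conv_rhs => rw [if_neg h]
    unfold rowsToDict
    generalize PySem.List.pyRange 1 200 1 = l
    rw [List.foldl_map]
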